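-- pv_equiv track=rewrite | github.com/KILNK1204/Modular-Video-Codec-with-Advanced-Features | src/utils/generated_file_process_util.py | differential_decode_motion_vectors
-- ===== SOURCE A (Python) =====
-- def differential_decode_motion_vectors(diff_encoded_mvs):
--     prev_frame_idx, prev_mv_x, prev_mv_y = 0, 0, 0
--     decoded_mvs = []
--
--     for diff_mv in diff_encoded_mvs:
--         diff_frame_idx, diff_mv_x, diff_mv_y = diff_mv
--
--         frame_idx = prev_frame_idx + diff_frame_idx
--         mv_x = prev_mv_x + diff_mv_x
--         mv_y = prev_mv_y + diff_mv_y
--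
--         decoded_mvs.append((frame_idx, mv_x, mv_y))
--         prev_frame_idx, prev_mv_x, prev_mv_y = frame_idx, mv_x, mv_y
--
--     return decoded_mvs
-- ===== SOURCE B (Python) =====
-- from itertools import accumulate
--
-- def differential_decode_motion_vectors(diff_encoded_mvs):
--     fis, xs, ys = [], [], []
--     for mv in diff_encoded_mvs:
--         fi, x, y = mv
--         fis.append(fi)
--         xs.append(x)
--         ys.append(y)
--     return list(zip(accumulate(fis), accumulate(xs), accumulate(ys)))
-- ===== Notes on version B (the rewrite author's own statement) =====
-- stated objective: alternative
-- what changed: Replaces the manual prev-state loop with three per-component prefix sums via itertools.accumulate, zipped back into tuples.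
import Mathlib
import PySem

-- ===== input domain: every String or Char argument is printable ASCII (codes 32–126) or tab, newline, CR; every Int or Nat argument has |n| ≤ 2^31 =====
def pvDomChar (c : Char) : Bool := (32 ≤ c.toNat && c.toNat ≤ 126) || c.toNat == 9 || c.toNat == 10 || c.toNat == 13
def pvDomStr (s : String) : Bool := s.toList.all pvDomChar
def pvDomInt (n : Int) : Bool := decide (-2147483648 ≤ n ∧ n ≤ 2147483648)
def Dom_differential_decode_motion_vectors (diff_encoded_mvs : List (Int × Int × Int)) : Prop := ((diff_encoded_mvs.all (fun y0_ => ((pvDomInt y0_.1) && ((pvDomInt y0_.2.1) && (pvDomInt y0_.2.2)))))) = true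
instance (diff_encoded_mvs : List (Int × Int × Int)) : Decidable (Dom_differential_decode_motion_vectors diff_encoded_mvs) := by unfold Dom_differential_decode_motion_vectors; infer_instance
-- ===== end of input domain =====

-- B replaces A's manual prev-state loop by three per-component prefix sums (accumulate) zipped back into tuples; objective: alternative decomposition.


-- ===== PORT A =====
-- literal transliteration: state = ((prev_frame_idx, prev_mv_x, prev_mv_y), decoded_mvs)
def differential_decode_motion_vectors (diff_encoded_mvs : List (Int × Int × Int)) : List (Int × Int × Int) :=
  (diff_encoded_mvs.foldl
    (fun (st : (Int × Int × Int) × List (Int × Int × Int)) diff_mv =>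
      let frame_idx := st.1.1 + diff_mv.1
      let mv_x := st.1.2.1 + diff_mv.2.1
      let mv_y := st.1.2.2 + diff_mv.2.2
      ((frame_idx, mv_x, mv_y), st.2 ++ [(frame_idx, mv_x, mv_y)]))
    ((0, 0, 0), [])).2

-- ===== PORT B =====
-- itertools.accumulate (running integer sums, no initial element)
def pyAccumulateFrom (tot : Int) : List Int → List Int
  | [] => []
  | x :: xs => (tot + x) :: pyAccumulateFrom (tot + x) xs

def differential_decode_motion_vectors_alt (diff_encoded_mvs : List (Int × Int × Int)) : List (Int × Int × Int) :=
  -- the unpacking loop building fis, xs, ys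
  let comps := diff_encoded_mvs.foldl
    (fun (st : List Int × List Int × List Int) mv =>
      (st.1 ++ [mv.1], st.2.1 ++ [mv.2.1], st.2.2 ++ [mv.2.2]))
    ([], [], [])
  -- list(zip(accumulate(fis), accumulate(xs), accumulate(ys)))
  List.zip (pyAccumulateFrom 0 comps.1)
    (List.zip (pyAccumulateFrom 0 comps.2.1) (pyAccumulateFrom 0 comps.2.2))

-- ===== PRECONDITION & SPEC =====
def Spec_differential_decode_motion_vectors (diff_encoded_mvs : List (Int × Int × Int)) (out : List (Int × Int × Int)) : Prop := out = differential_decode_motion_vectors_alt diff_encoded_mvs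
instance (diff_encoded_mvs : List (Int × Int × Int)) (out : List (Int × Int × Int)) : Decidable (Spec_differential_decode_motion_vectors diff_encoded_mvs out) := by unfold Spec_differential_decode_motion_vectors; infer_instance

-- ===== CLAIM (what is proved, stated in full; the proofs are below) =====
def Claim_equal_differential_decode_motion_vectors : Prop := ∀ (diff_encoded_mvs : List (Int × Int × Int)), Dom_differential_decode_motion_vectors diff_encoded_mvs → Spec_differential_decode_motion_vectors diff_encoded_mvs (differential_decode_motion_vectors diff_encoded_mvs)

-- ===== LEMMAS AND PROOFS =====

-- B's unzip loop builds exactly the three component maps.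
lemma unzip_foldl (l : List (Int × Int × Int)) (a b c : List Int) :
    l.foldl (fun (st : List Int × List Int × List Int) mv =>
      (st.1 ++ [mv.1], st.2.1 ++ [mv.2.1], st.2.2 ++ [mv.2.2])) (a, b, c)
    = (a ++ l.map (·.1), b ++ l.map (·.2.1), c ++ l.map (·.2.2)) := by
  induction l generalizing a b c with
  | nil => simp
  | cons mv t ih => simp [List.foldl, ih]

-- A's fold from an arbitrary previous state equals acc ++ the zipped prefix sums from that state.
lemma foldA_eq (l : List (Int × Int × Int)) (pf px py : Int) (acc : List (Int × Int × Int)) :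
    (l.foldl
      (fun (st : (Int × Int × Int) × List (Int × Int × Int)) diff_mv =>
        let frame_idx := st.1.1 + diff_mv.1
        let mv_x := st.1.2.1 + diff_mv.2.1
        let mv_y := st.1.2.2 + diff_mv.2.2
        ((frame_idx, mv_x, mv_y), st.2 ++ [(frame_idx, mv_x, mv_y)]))
      ((pf, px, py), acc)).2
    = acc ++ List.zip (pyAccumulateFrom pf (l.map (·.1)))
        (List.zip (pyAccumulateFrom px (l.map (·.2.1))) (pyAccumulateFrom py (l.map (·.2.2)))) := by
  induction l generalizing pf px py acc with
  | nil => simp [pyAccumulateFrom]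
  | cons mv t ih =>
      simp only [List.foldl, List.map, pyAccumulateFrom, List.zip_cons_cons]
      rw [ih]
      simp

-- ===== VERDICT (by name: the statement is the Claim_ definition above) =====
theorem differential_decode_motion_vectors_spec : Claim_equal_differential_decode_motion_vectors := by
  intro l _
  unfold Spec_differential_decode_motion_vectors differential_decode_motion_vectors
    differential_decode_motion_vectors_alt
  rw [foldA_eq, unzip_foldl]
  simp
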